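-- pv_equiv track=rewrite | github.com/broker0/adventofcode2025 | day06.py | parse
-- ===== SOURCE A (Python) =====
-- def parse(lines):
--     problems = []
--
--     num_lines_count = len(lines)-1
--     delimiter = ' ' * num_lines_count
--     curr_problem = []
--
--     for i in range(len(lines[0])):
--         curr_slice = [lines[j][i] for j in range(num_lines_count)]
--         curr_problem += [curr_slice]
--         curr_col = ''.join(curr_slice)
--
--         if curr_col == delimiter:
--             problems.append(curr_problem[:-1])
--             curr_problem = []
--
--     problems.append(curr_problem[:-1])
--     ops = lines[-1].split()
--
--     return ops, problems
-- ===== SOURCE B (Python) =====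
-- def parse(lines):
--     height = len(lines) - 1
--     cols = [[lines[j][i] for j in range(height)] for i in range(len(lines[0]))]
--     blank = [' '] * height
--     # a problem ends one column before each delimiter; the last one before the final column
--     cuts = [i for i, col in enumerate(cols) if col == blank]
--     starts = [0] + [c + 1 for c in cuts]
--     ends = cuts + [len(cols) - 1]
--     problems = [cols[s:e] for s, e in zip(starts, ends)]
--     return lines[-1].split(), problems
-- ===== Notes on version B (the rewrite author's own statement) =====
-- stated objective: alternative
-- what changed: A interleaves transposition with delimiter detection in one index loop carrying a current-problem accumulator; B first builds the whole transposed column table, computes the delimiter cut positions, and takes one slice of the table per problem.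
import Mathlib
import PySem

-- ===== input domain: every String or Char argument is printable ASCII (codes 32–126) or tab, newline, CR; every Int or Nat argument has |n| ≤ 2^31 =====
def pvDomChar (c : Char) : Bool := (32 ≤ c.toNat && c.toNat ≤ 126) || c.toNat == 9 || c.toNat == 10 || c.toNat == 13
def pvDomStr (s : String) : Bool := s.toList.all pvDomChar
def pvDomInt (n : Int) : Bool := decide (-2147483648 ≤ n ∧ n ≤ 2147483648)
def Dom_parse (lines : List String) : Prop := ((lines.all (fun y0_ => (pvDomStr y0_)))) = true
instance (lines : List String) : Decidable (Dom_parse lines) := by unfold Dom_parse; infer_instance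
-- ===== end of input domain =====

-- B builds the whole transposed column table first, computes the delimiter-column cut
-- indices, and takes one slice of the table per problem, instead of A's single index
-- loop carrying a running accumulator; objective: alternative decomposition (same cost).

-- ===== PORT A =====
-- lines[j][i] as a 1-character Python string; "" is never reached under Pre_parse
-- (out-of-range indexing is an IndexError, excluded by Pre_parse).
def pvStrAt (s : String) (i : Int) : String :=
  match PySem.Str.pyGet? s i with
  | some c => String.ofList [c]
  | none => ""

def parse (lines : List String) : List String × List (List (List String)) :=
  let numLinesCount : Int := PySem.List.len lines - 1
  let delimiter : String := String.ofList (PySem.List.pyRepeat [' '] numLinesCount)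
  let st := (PySem.List.pyRange 0 (PySem.Str.len (PySem.List.pyGetD lines 0 "")) 1).foldl
    (fun (st : List (List (List String)) × List (List String)) i =>
      let currSlice := (PySem.List.pyRange 0 numLinesCount 1).map
        (fun j => pvStrAt (PySem.List.pyGetD lines j "") i)
      let currProblem := st.2 ++ [currSlice]
      let currCol := PySem.Str.join "" currSlice
      if currCol = delimiter then
        (st.1 ++ [PySem.List.slice currProblem none (some (-1))], ([] : List (List String)))
      else
        (st.1, currProblem))
    (([], []) : List (List (List String)) × List (List String))
  let problems := st.1 ++ [PySem.List.slice st.2 none (some (-1))]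
  let ops := PySem.Str.split₀ (PySem.List.pyGetD lines (-1) "")
  (ops, problems)

-- ===== PORT B =====
def parse_alt (lines : List String) : List String × List (List (List String)) :=
  let height : Int := PySem.List.len lines - 1
  let cols := (PySem.List.pyRange 0 (PySem.Str.len (PySem.List.pyGetD lines 0 "")) 1).map
    (fun i => (PySem.List.pyRange 0 height 1).map (fun j => pvStrAt (PySem.List.pyGetD lines j "") i))
  let blank : List String := PySem.List.pyRepeat [" "] height
  let cuts := ((PySem.List.enumerate cols).filter (fun p => decide (p.2 = blank))).map (·.1)
  let starts := 0 :: cuts.map (· + 1)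
  let ends := cuts ++ [PySem.List.len cols - 1]
  let problems := (starts.zip ends).map (fun p => PySem.List.slice cols (some p.1) (some p.2))
  (PySem.Str.split₀ (PySem.List.pyGetD lines (-1) ""), problems)

-- ===== PRECONDITION & SPEC =====
-- Pre_ excludes exactly the inputs where Python A raises IndexError: the empty list
-- (lines[0]), and inputs where one of the first len(lines)-1 lines is shorter than lines[0].
def Pre_parse (lines : List String) : Prop :=
  lines ≠ [] ∧ ∀ s ∈ lines.dropLast, (lines.headD "").toList.length ≤ s.toList.length

instance (lines : List String) : Decidable (Pre_parse lines) := by unfold Pre_parse; infer_instance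

def pvWitness_parse : List String := ["ab c", "12 3", "+ *"]

def Spec_parse (lines : List String) (out : List String × List (List (List String))) : Prop := out = parse_alt lines
instance (lines : List String) (out : List String × List (List (List String))) : Decidable (Spec_parse lines out) := by unfold Spec_parse; infer_instance

-- ===== CLAIM (what is proved, stated in full; the proofs are below) =====
def Claim_equal_parse : Prop := ∀ (lines : List String), Dom_parse lines → Pre_parse lines → Spec_parse lines (parse lines)

-- ===== LEMMAS AND PROOFS =====

-- proof-side helper: (closed segments, trailing open segment) of a column list
def pvSplitCols (blank : List String) : List (List String) → List (List (List String)) × List (List String)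
  | [] => ([], [])
  | x :: xs =>
    let r := pvSplitCols blank xs
    if x = blank then ([] :: r.1, r.2)
    else
      match r.1 with
      | [] => ([], x :: r.2)
      | s :: rest => ((x :: s) :: rest, r.2)

-- proof-side helper: positions of the blank columns
def pvCuts (blank : List String) : List (List String) → List Int
  | [] => []
  | x :: xs => if x = blank then 0 :: (pvCuts blank xs).map (· + 1) else (pvCuts blank xs).map (· + 1)

def pvProbs (blank : List String) (cols : List (List String)) : List (List (List String)) :=
  ((0 :: (pvCuts blank cols).map (· + 1)).zip (pvCuts blank cols ++ [(cols.length : Int) - 1])).map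
    (fun p => PySem.List.slice cols (some p.1) (some p.2))

theorem pvStrAt_short (s : String) (i : Int) : (pvStrAt s i).toList.length ≤ 1 := by
  unfold pvStrAt
  cases PySem.Str.pyGet? s i <;> simp

theorem join_nil_cons (x : List Char) (xs : List (List Char)) :
    PySem.Chars.join [] (x :: xs) = x ++ PySem.Chars.join [] xs := by
  simp [PySem.Chars.join, List.intercalate]
  cases xs <;> simp [List.intersperse]

theorem join_len_le : ∀ (ls : List String), (∀ s ∈ ls, s.toList.length ≤ 1) →
    (PySem.Chars.join [] (ls.map String.toList)).length ≤ ls.length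
  | [], _ => by simp [PySem.Chars.join, List.intercalate]
  | s :: rest, h => by
    simp only [List.map_cons, join_nil_cons, List.length_append, List.length_cons]
    have h1 := h s (by simp)
    have h2 := join_len_le rest (fun t ht => h t (by simp [ht]))
    omega

theorem join_blank_iff_aux : ∀ (ls : List String), (∀ s ∈ ls, s.toList.length ≤ 1) →
    ((PySem.Chars.join [] (ls.map String.toList) = List.replicate ls.length ' ')
      ↔ ls = List.replicate ls.length " ")
  | [], _ => by simp [PySem.Chars.join, List.intercalate]
  | s :: rest, h => by
    have hs := h s (by simp)
    have hrest : ∀ t ∈ rest, t.toList.length ≤ 1 := fun t ht => h t (by simp [ht])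
    have ih := join_blank_iff_aux rest hrest
    simp only [List.map_cons, join_nil_cons, List.length_cons, List.replicate_succ]
    constructor
    · intro heq
      cases hst : s.toList with
      | nil =>
        rw [hst] at heq
        simp only [List.nil_append] at heq
        have hl : (PySem.Chars.join [] (rest.map String.toList)).length = rest.length + 1 := by
          rw [heq]; simp
        have := join_len_le rest hrest
        omega
      | cons c tail =>
        have htail : tail = [] := by
          have h' := hs; rw [hst] at h'
          simp only [List.length_cons] at h'
          exact List.length_eq_zero_iff.mp (by omega)
        subst htail
        rw [hst] at heq
        simp only [List.cons_append, List.nil_append, List.cons.injEq] at heq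
        obtain ⟨hc, h2⟩ := heq
        have hsx : s = " " := String.toList_inj.mp (by rw [hst, hc]; rfl)
        rw [hsx, ih.mp h2]
        simp
    · intro heq
      rw [List.cons_eq_cons] at heq
      obtain ⟨h1, h2⟩ := heq
      rw [h1, show (" " : String).toList = [' '] from rfl, ih.mpr h2]
      simp

theorem join_blank_iff (l : List String) (h : ∀ s ∈ l, s.toList.length ≤ 1) :
    (PySem.Str.join "" l = String.ofList (List.replicate l.length ' ')) ↔ l = List.replicate l.length " " := by
  rw [show (PySem.Str.join "" l = String.ofList (List.replicate l.length ' ')) ↔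
      (PySem.Str.join "" l).toList = (String.ofList (List.replicate l.length ' ')).toList from
      ⟨fun h => by rw [h], String.toList_inj.mp⟩]
  simpa using join_blank_iff_aux l h

theorem foldSimple_split (blank : List String) (f : Int → List String) : ∀ (is : List Int)
    (P : List (List (List String))) (C : List (List String)),
    is.foldl (fun st i => if f i = blank then (st.1 ++ [st.2], ([] : List (List String))) else (st.1, st.2 ++ [f i])) (P, C)
    = match pvSplitCols blank (is.map f) with
      | ([], t) => (P, C ++ t)
      | (s :: segs, t) => (P ++ (C ++ s) :: segs, t)
  | [], P, C => by simp [pvSplitCols]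
  | i :: is, P, C => by
    rw [List.foldl_cons, List.map_cons]
    by_cases hb : f i = blank
    · rw [if_pos hb]; dsimp only
      rw [foldSimple_split blank f is (P ++ [C]) []]
      simp only [pvSplitCols, if_pos hb]
      cases pvSplitCols blank (is.map f) with
      | mk segs t => cases segs <;> simp
    · rw [if_neg hb]; dsimp only
      rw [foldSimple_split blank f is P (C ++ [f i])]
      simp only [pvSplitCols, if_neg hb]
      cases pvSplitCols blank (is.map f) with
      | mk segs t => cases segs <;> simp

-- A's value, expressed through pvSplitCols (proved by the fold lemma above)
theorem parse_eq_split (lines : List String) :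
    parse lines =
      (PySem.Str.split₀ (PySem.List.pyGetD lines (-1) ""),
        (pvSplitCols (List.replicate (PySem.List.len lines - 1).toNat " ")
          ((PySem.List.pyRange 0 (PySem.Str.len (PySem.List.pyGetD lines 0 "")) 1).map
            (fun i => (PySem.List.pyRange 0 (PySem.List.len lines - 1) 1).map
              (fun j => pvStrAt (PySem.List.pyGetD lines j "") i)))).1 ++
        [(pvSplitCols (List.replicate (PySem.List.len lines - 1).toNat " ")
          ((PySem.List.pyRange 0 (PySem.Str.len (PySem.List.pyGetD lines 0 "")) 1).map
            (fun i => (PySem.List.pyRange 0 (PySem.List.len lines - 1) 1).map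
              (fun j => pvStrAt (PySem.List.pyGetD lines j "") i)))).2.dropLast]) := by
  unfold parse
  dsimp only
  rw [PySem.List.pyRepeat_singleton]
  have hcongr := PySem.List.foldl_congr_mem
    (l := PySem.List.pyRange 0 (PySem.Str.len (PySem.List.pyGetD lines 0 "")) 1)
    (init := (([], []) : List (List (List String)) × List (List String)))
    (f := fun (st : List (List (List String)) × List (List String)) i =>
      let currSlice := (PySem.List.pyRange 0 (PySem.List.len lines - 1) 1).map
        (fun j => pvStrAt (PySem.List.pyGetD lines j "") i)
      let currProblem := st.2 ++ [currSlice]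
      let currCol := PySem.Str.join "" currSlice
      if currCol = String.ofList (List.replicate (PySem.List.len lines - 1).toNat ' ') then
        (st.1 ++ [PySem.List.slice currProblem none (some (-1))], ([] : List (List String)))
      else
        (st.1, currProblem))
    (g := fun (st : List (List (List String)) × List (List String)) i =>
      if ((PySem.List.pyRange 0 (PySem.List.len lines - 1) 1).map
            (fun j => pvStrAt (PySem.List.pyGetD lines j "") i))
          = List.replicate (PySem.List.len lines - 1).toNat " " then
        (st.1 ++ [st.2], ([] : List (List String)))
      else
        (st.1, st.2 ++ [(PySem.List.pyRange 0 (PySem.List.len lines - 1) 1).map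
            (fun j => pvStrAt (PySem.List.pyGetD lines j "") i)]))
    (by
      intro acc i _
      dsimp only
      set sl := (PySem.List.pyRange 0 (PySem.List.len lines - 1) 1).map
        (fun j => pvStrAt (PySem.List.pyGetD lines j "") i) with hsl
      have hshort : ∀ s ∈ sl, s.toList.length ≤ 1 := by
        intro s hsm
        rw [hsl] at hsm
        obtain ⟨j, _, rfl⟩ := List.mem_map.mp hsm
        exact pvStrAt_short _ _
      have hlen : sl.length = (PySem.List.len lines - 1).toNat := by
        rw [hsl]
        simp [PySem.List.length_pyRange_one]
      have hcond := join_blank_iff sl hshort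
      rw [hlen] at hcond
      rw [PySem.List.slice_to_neg_one, List.dropLast_concat]
      simp only [hcond])
  rw [hcongr, foldSimple_split]
  cases pvSplitCols (List.replicate (PySem.List.len lines - 1).toNat " ")
      ((PySem.List.pyRange 0 (PySem.Str.len (PySem.List.pyGetD lines 0 "")) 1).map
        (fun i => (PySem.List.pyRange 0 (PySem.List.len lines - 1) 1).map
          (fun j => pvStrAt (PySem.List.pyGetD lines j "") i))) with
  | mk segs t =>
    cases segs <;> simp [PySem.List.slice_to_neg_one]

-- enumerate/filter form of the cut positions equals pvCuts (shifted by the start offset)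
theorem enum_filter_cuts (blank : List String) : ∀ (xs : List (List String)) (s : Int),
    ((PySem.List.enumerate xs s).filter (fun p => decide (p.2 = blank))).map (·.1)
      = (pvCuts blank xs).map (· + s)
  | [], _ => by simp [PySem.List.enumerate_nil, pvCuts]
  | x :: xs, s => by
    rw [PySem.List.enumerate_cons, List.filter_cons]
    have ih := enum_filter_cuts blank xs (s + 1)
    have hmm : ∀ (l : List Int), l.map (· + (s + 1)) = (l.map (· + 1)).map (· + s) := by
      intro l; rw [List.map_map]; apply List.map_congr_left; intro a _; simp; omega
    by_cases hb : x = blank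
    · rw [if_pos (by simp [hb])]
      simp only [pvCuts, if_pos hb, List.map_cons, ih, hmm]
      simp
    · rw [if_neg (by simp [hb])]
      simp only [pvCuts, if_neg hb, ih, hmm]

theorem pvCuts_nonneg (blank : List String) : ∀ (xs : List (List String)), ∀ c ∈ pvCuts blank xs, 0 ≤ c
  | [], c, hc => by simp [pvCuts] at hc
  | x :: xs, c, hc => by
    unfold pvCuts at hc
    have ih := pvCuts_nonneg blank xs
    split at hc
    · rcases List.mem_cons.mp hc with rfl | hc2
      · omega
      · obtain ⟨a, ha, rfl⟩ := List.mem_map.mp hc2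
        have := ih a ha; omega
    · obtain ⟨a, ha, rfl⟩ := List.mem_map.mp hc
      have := ih a ha; omega

theorem pvCuts_len (blank : List String) : ∀ (xs : List (List String)),
    (pvCuts blank xs).length = (pvSplitCols blank xs).1.length
  | [] => by simp [pvCuts, pvSplitCols]
  | x :: xs => by
    have ih := pvCuts_len blank xs
    unfold pvCuts pvSplitCols
    by_cases hb : x = blank
    · simp [hb, ih]
    · simp only [if_neg hb]
      cases h : (pvSplitCols blank xs).1 <;> simp_all

theorem pvSplit_tail_ne (blank : List String) : ∀ (xs : List (List String)), xs ≠ [] →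
    (pvSplitCols blank xs).1 = [] → (pvSplitCols blank xs).2 ≠ []
  | [], h, _ => absurd rfl h
  | x :: xs, _, h1 => by
    unfold pvSplitCols at h1 ⊢
    by_cases hb : x = blank
    · simp [hb] at h1
    · simp only [if_neg hb] at h1 ⊢
      cases h : (pvSplitCols blank xs).1 <;> simp_all

theorem slice_shift {α : Type} (x : α) (xs : List α) (s e : Int) (hs : 0 ≤ s) (he : 0 ≤ e) :
    PySem.List.slice (x :: xs) (some (s + 1)) (some (e + 1)) = PySem.List.slice xs (some s) (some e) := by
  rw [PySem.List.slice_toNat (x :: xs) (by omega) (by omega), PySem.List.slice_toNat xs hs he]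
  rw [show (e + 1).toNat = e.toNat + 1 by omega, show (s + 1).toNat = s.toNat + 1 by omega,
    List.drop_succ_cons, Nat.add_sub_add_right]

theorem slice_zero_succ {α : Type} (x : α) (xs : List α) (e : Int) (he : 0 ≤ e) :
    PySem.List.slice (x :: xs) (some 0) (some (e + 1)) = x :: PySem.List.slice xs (some 0) (some e) := by
  rw [PySem.List.slice_toNat (x :: xs) le_rfl (by omega), PySem.List.slice_toNat xs le_rfl he]
  have h1 : (e + 1).toNat = e.toNat + 1 := by omega
  simp [h1]

-- the cut-and-slice construction computes segments ++ [final segment minus its last column]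
theorem slice_zero_zero {α : Type} (l : List α) : PySem.List.slice l (some 0) (some 0) = [] := by
  rw [PySem.List.slice_toNat l le_rfl le_rfl]; simp

theorem map_add_one_append (l : List Int) (a : Int) :
    l.map (· + 1) ++ [a + 1] = (l ++ [a]).map (· + 1) := by simp

theorem probs_shift (x : List String) (xs : List (List String)) (ss es : List Int)
    (hs : ∀ s ∈ ss, 0 ≤ s) (he : ∀ e ∈ es, 0 ≤ e) :
    ((ss.map (· + 1)).zip (es.map (· + 1))).map
        (fun p => PySem.List.slice (x :: xs) (some p.1) (some p.2))
      = (ss.zip es).map (fun p => PySem.List.slice xs (some p.1) (some p.2)) := by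
  rw [List.zip_map, List.map_map]
  apply List.map_congr_left
  intro p hp
  obtain ⟨h1, h2⟩ := List.of_mem_zip (a := p.1) (b := p.2) (by simpa using hp)
  simp only [Function.comp_apply, Prod.map_apply]
  exact slice_shift x xs p.1 p.2 (hs _ h1) (he _ h2)

theorem pvProbs_eq_split (blank : List String) : ∀ (cols : List (List String)),
    pvProbs blank cols = (pvSplitCols blank cols).1 ++ [(pvSplitCols blank cols).2.dropLast]
  | [] => by simp [pvProbs, pvCuts, pvSplitCols, PySem.List.slice_to_neg_one]
  | x :: xs => by
    have ih := pvProbs_eq_split blank xs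
    rcases eq_or_ne xs [] with rfl | hxsne
    · by_cases hb : x = blank <;>
        simp [pvProbs, pvCuts, pvSplitCols, hb, PySem.List.slice, PySem.List.clampIdx]
    · have hlen0 : xs.length ≠ 0 := fun h => hxsne (List.length_eq_zero_iff.mp h)
      have hcn := pvCuts_nonneg blank xs
      have hL : ((x :: xs).length : Int) - 1 = ((xs.length : Int) - 1) + 1 := by
        simp only [List.length_cons]; omega
      have hL0 : (0 : Int) ≤ (xs.length : Int) - 1 := by omega
      unfold pvProbs
      unfold pvProbs at ih
      by_cases hb : x = blank
      · -- blank head: the head problem is [], the remaining slices shift by one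
        rw [show pvCuts blank (x :: xs) = 0 :: (pvCuts blank xs).map (· + 1) from by
          simp only [pvCuts, if_pos hb]]
        rw [hL, List.cons_append, map_add_one_append (pvCuts blank xs) ((xs.length : Int) - 1)]
        rw [show List.map (· + 1) ((0 : Int) :: (pvCuts blank xs).map (· + 1))
            = ((0 : Int) :: (pvCuts blank xs).map (· + 1)).map (· + 1) from rfl]
        rw [List.zip_cons_cons, List.map_cons, slice_zero_zero]
        rw [probs_shift x xs _ _
          (by
            intro s hs
            rcases List.mem_cons.mp hs with rfl | hs
            · exact le_rfl
            · obtain ⟨a, ha, rfl⟩ := List.mem_map.mp hs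
              have := hcn a ha; omega)
          (by
            intro e he
            rcases List.mem_append.mp he with he | he
            · exact hcn e he
            · simp only [List.mem_singleton] at he; omega)]
        rw [ih]
        simp [pvSplitCols, hb]
      · -- non-blank head: x is prepended to the head problem
        rw [show pvCuts blank (x :: xs) = (pvCuts blank xs).map (· + 1) from by
          simp only [pvCuts, if_neg hb]]
        rw [hL, map_add_one_append (pvCuts blank xs) ((xs.length : Int) - 1)]
        rcases hsc : pvSplitCols blank xs with ⟨segs, t⟩
        rw [hsc] at ih
        cases hc : pvCuts blank xs with
        | nil =>
          have hsegnil : segs = [] := by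
            have hl := pvCuts_len blank xs
            rw [hc, hsc] at hl
            exact (List.length_eq_zero_iff.mp hl.symm)
          subst hsegnil
          have htne : t ≠ [] := by
            have := pvSplit_tail_ne blank xs hxsne
            rw [hsc] at this
            exact this rfl
          rw [hc] at ih
          simp only [List.map_nil, List.nil_append, List.zip_cons_cons, List.zip_nil_right,
            List.map_cons, List.map_nil, List.cons_eq_cons] at ih
          simp only [List.map_nil, List.nil_append, List.zip_cons_cons, List.zip_nil_right,
            List.map_cons, List.map_nil]
          rw [slice_zero_succ x xs _ hL0, ih.1]
          simp only [pvSplitCols, if_neg hb, hsc, List.nil_append]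
          rw [List.dropLast_cons_of_ne_nil htne]
        | cons c cs' =>
          have hsegne : segs ≠ [] := by
            have hl := pvCuts_len blank xs
            rw [hc, hsc] at hl
            intro hnil; rw [hnil] at hl; simp at hl
          rcases segs with _ | ⟨s, rest⟩
          · exact absurd rfl hsegne
          have hc0 : 0 ≤ c := hcn c (by rw [hc]; simp)
          have hcs' : ∀ a ∈ cs', 0 ≤ a := fun a ha => hcn a (by rw [hc]; simp [ha])
          rw [hc] at ih
          rw [List.cons_append, List.map_cons, List.zip_cons_cons, List.map_cons] at ih
          rw [List.cons_append, List.cons_eq_cons] at ih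
          obtain ⟨ih1, ih2⟩ := ih
          have ih1' : PySem.List.slice xs (some 0) (some c) = s := ih1
          rw [List.cons_append (as := cs')]
          rw [show List.map (fun x : Int => x + 1) (c :: (cs' ++ [(xs.length : Int) - 1]))
              = (c + 1) :: List.map (fun x => x + 1) (cs' ++ [(xs.length : Int) - 1]) from rfl]
          rw [List.zip_cons_cons, List.map_cons]
          rw [probs_shift x xs ((c :: cs').map (· + 1)) (cs' ++ [(xs.length : Int) - 1])
            (by
              intro a ha
              rcases List.mem_cons.mp ha with rfl | ha
              · show (0 : Int) ≤ c + 1; omega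
              · obtain ⟨a', ha', rfl⟩ := List.mem_map.mp ha
                have := hcs' a' ha'; omega)
            (by
              intro e he
              rcases List.mem_append.mp he with he | he
              · exact hcs' e he
              · simp only [List.mem_singleton] at he; omega)]
          rw [show List.map (fun x : Int => x + 1) (c :: cs')
              = (c + 1) :: List.map (fun x => x + 1) cs' from rfl, ih2]
          rw [slice_zero_succ x xs c hc0, ih1']
          simp only [pvSplitCols, if_neg hb, hsc]
          simp

set_option maxHeartbeats 1000000 in
theorem parse_eq (lines : List String) : parse lines = parse_alt lines := by
  rw [parse_eq_split]
  unfold parse_alt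
  dsimp only
  rw [PySem.List.pyRepeat_singleton]
  congr 1
  rw [show ((PySem.List.enumerate
        ((PySem.List.pyRange 0 (PySem.Str.len (PySem.List.pyGetD lines 0 "")) 1).map
          (fun i => (PySem.List.pyRange 0 (PySem.List.len lines - 1) 1).map
            (fun j => pvStrAt (PySem.List.pyGetD lines j "") i)))).filter
          (fun p => decide (p.2 = List.replicate (PySem.List.len lines - 1).toNat " "))).map (·.1)
      = (pvCuts (List.replicate (PySem.List.len lines - 1).toNat " ")
          ((PySem.List.pyRange 0 (PySem.Str.len (PySem.List.pyGetD lines 0 "")) 1).map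
            (fun i => (PySem.List.pyRange 0 (PySem.List.len lines - 1) 1).map
              (fun j => pvStrAt (PySem.List.pyGetD lines j "") i)))).map (· + 0) from by
        rw [← enum_filter_cuts]]
  rw [show ∀ (l : List Int), l.map (· + 0) = l from fun l => by
    induction l with
    | nil => rfl
    | cons a l ih => simp [ih]]
  rw [← pvProbs_eq_split]
  unfold pvProbs
  rfl

-- ===== VERDICT (by name: the statement is the Claim_ definition above) =====
theorem parse_spec : Claim_equal_parse := by
  intro lines _ _
  exact parse_eq lines
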